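-- pv_equiv track=rewrite | github.com/hannahtrautmann/Python-Assignment | python_assignment.py | observed_kmers_list
-- ===== SOURCE A (Python) =====
-- def observed_kmers_list(sequence):
--     """
--     Summary line: Generates a list of observed kmers for a given sequence
--
--     Extended description:Takes a sequence and loops through reading kmers,
--     adding a value to the dictionary if it is a new.
--     Then counts values in each dictionary to determine unique kmers for each k.
--
--     Parameters:
--     sequence : a string of nucleotides
--
--     Return:
--     list : a list that contains number of all observed kmers for each possible k
--     """
--     observed = []
--     for obk in range(1,len(sequence)+1):
--         observed_kmer_dict = {}
--         total_kmers = len(sequence) - obk + 1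
--         for i in range(total_kmers):
--             kmer=sequence[i:i+obk]
--             if kmer not in observed_kmer_dict:
--                 observed_kmer_dict[kmer] = 1
--             else:
--                 observed_kmer_dict[kmer] += 1
--         observed.append(len(observed_kmer_dict))
--     return observed
-- ===== SOURCE B (Python) =====
-- def observed_kmers_list(sequence):
--     n = len(sequence)
--     observed = []
--     for k in range(1, n + 1):
--         kmers = sorted(sequence[i:i + k] for i in range(n - k + 1))
--         distinct = 0
--         prev = None
--         for km in kmers:
--             if km != prev:
--                 distinct += 1
--                 prev = km
--         observed.append(distinct)
--     return observed
-- ===== Notes on version B (the rewrite author's own statement) =====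
-- stated objective: alternative
-- what changed: Per length k, A counts distinct k-mers by building a dictionary of counts and taking its length; B instead sorts the list of k-mers and counts group boundaries in one linear scan, with no dictionary at all.
import Mathlib
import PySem

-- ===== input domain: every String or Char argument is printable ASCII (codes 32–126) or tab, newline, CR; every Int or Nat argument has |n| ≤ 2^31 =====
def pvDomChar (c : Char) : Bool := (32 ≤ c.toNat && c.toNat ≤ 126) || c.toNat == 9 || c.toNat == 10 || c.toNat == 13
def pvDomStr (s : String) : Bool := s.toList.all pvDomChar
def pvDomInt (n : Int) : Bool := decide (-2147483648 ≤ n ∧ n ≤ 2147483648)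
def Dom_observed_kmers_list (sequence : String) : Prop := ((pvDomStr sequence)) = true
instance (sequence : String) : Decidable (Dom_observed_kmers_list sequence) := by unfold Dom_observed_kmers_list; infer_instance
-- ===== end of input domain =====

-- B replaces A's per-length counting dictionary by a sort-then-scan pass (sort the k-mers, count
-- group boundaries); objective: alternative algorithm, not claimed faster.

-- ===== PORT A =====
def observed_kmers_list (sequence : String) : List Int :=
  (PySem.List.pyRange 1 (PySem.Str.len sequence + 1)).foldl (fun observed obk =>
    let total_kmers := PySem.Str.len sequence - obk + 1
    let d := (PySem.List.pyRange 0 total_kmers).foldl (fun d i =>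
        let kmer := PySem.Str.slice sequence (some i) (some (i + obk))
        if d.contains kmer = false then d.insert kmer 1
        else d.insert kmer (d.getD kmer 0 + 1))
      (PySem.Dict.empty (κ := String) (ν := Int))
    observed ++ [(d.size : Int)]) []

-- ===== PORT B =====
def observed_kmers_list_alt (sequence : String) : List Int :=
  (PySem.List.pyRange 1 (PySem.Str.len sequence + 1)).foldl (fun observed k =>
    let kmers := PySem.List.sorted
      ((PySem.List.pyRange 0 (PySem.Str.len sequence - k + 1)).map
        (fun i => PySem.Str.slice sequence (some i) (some (i + k)))) (fun x => x)
    let st := kmers.foldl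
      (fun st km => if some km ≠ st.2 then (st.1 + 1, some km) else st)
      ((0 : Int), (none : Option String))
    observed ++ [st.1]) []

-- ===== PRECONDITION & SPEC =====
def Spec_observed_kmers_list (sequence : String) (out : List Int) : Prop := out = observed_kmers_list_alt sequence
instance (sequence : String) (out : List Int) : Decidable (Spec_observed_kmers_list sequence out) := by unfold Spec_observed_kmers_list; infer_instance

-- ===== CLAIM (what is proved, stated in full; the proofs are below) =====
def Claim_equal_observed_kmers_list : Prop := ∀ (sequence : String), Dom_observed_kmers_list sequence → Spec_observed_kmers_list sequence (observed_kmers_list sequence)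

-- ===== LEMMAS AND PROOFS =====

theorem card_insert_erase (x : String) (s : Finset String) :
    (insert x s).card = (s.erase x).card + 1 := by
  rw [← Finset.insert_erase (Finset.mem_insert_self x s), Finset.erase_insert_eq_erase]
  exact Finset.card_insert_of_notMem (Finset.notMem_erase x s)

theorem card_cons_filter (x : String) (l : List String) :
    (x :: l).toFinset.card = (l.filter (fun y => y ≠ x)).toFinset.card + 1 := by
  have h : l.toFinset.erase x = (l.filter (fun y => y ≠ x)).toFinset := by
    ext y; simp [and_comm]
  rw [List.toFinset_cons, card_insert_erase, h]

-- B's inner scan, started after a previous k-mer p that lower-bounds the sorted remainder,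
-- adds the number of distinct k-mers other than p.
theorem scan_some (m : List String) (hs : m.Pairwise (· ≤ ·)) :
    ∀ (c : Int) (p : String), (∀ y ∈ m, p ≤ y) →
    (m.foldl (fun st km => if some km ≠ st.2 then (st.1 + 1, some km) else st) (c, some p)).1
      = c + ((m.filter (fun y => y ≠ p)).toFinset.card : Int) := by
  induction m with
  | nil => intro c p _; simp
  | cons x rest ih =>
    intro c p hp
    have hrest := hs.of_cons
    have hhead : ∀ y ∈ rest, x ≤ y := (List.pairwise_cons.mp hs).1
    by_cases hxp : x = p
    · subst hxp
      have hstep0 : (if some x ≠ (c, some x).2 then ((c, some x).1 + 1, some x) else (c, some x)) = (c, some x) := by simp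
      simp only [List.foldl_cons]
      rw [hstep0, ih hrest c x (fun y hy => hp y (List.mem_cons_of_mem _ hy))]
      have hfx : (x :: rest).filter (fun y => y ≠ x) = rest.filter (fun y => y ≠ x) := by
        simp
      rw [hfx]
    · have hlt : p < x := lt_of_le_of_ne (hp x List.mem_cons_self) (Ne.symm hxp)
      have hstep : (if some x ≠ (c, some p).2 then ((c, some p).1 + 1, some x) else (c, some p)) = (c + 1, some x) := by
        simp [hxp]
      simp only [List.foldl_cons]
      rw [hstep, ih hrest (c + 1) x hhead]
      have hrp : rest.filter (fun y => y ≠ p) = rest := by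
        apply List.filter_eq_self.mpr
        intro y hy
        simp only [decide_eq_true_eq]
        exact fun h => absurd (h ▸ hhead y hy) (not_le.mpr hlt)
      have hfc : (x :: rest).filter (fun y => y ≠ p) = x :: rest := by
        rw [List.filter_cons, if_pos (by simp [hxp]), hrp]
      rw [hfc, card_cons_filter x rest]
      push_cast
      ring

-- B's scan over a sorted list counts the distinct elements.
theorem scan_none (m : List String) (hs : m.Pairwise (· ≤ ·)) (c : Int) :
    (m.foldl (fun st km => if some km ≠ st.2 then (st.1 + 1, some km) else st)
      (c, (none : Option String))).1 = c + (m.toFinset.card : Int) := by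
  cases m with
  | nil => simp
  | cons x rest =>
    have hstep : (if some x ≠ ((c, (none : Option String))).2 then ((c, (none : Option String)).1 + 1, some x) else (c, none)) = (c + 1, some x) := by simp
    simp only [List.foldl_cons]
    rw [hstep, scan_some rest hs.of_cons (c + 1) x (List.pairwise_cons.mp hs).1,
      card_cons_filter x rest]
    push_cast
    ring

theorem ofList_length_toFinset (l : List String) :
    (PySem.Set.ofList l).length = l.toFinset.card := by
  have h1 : (PySem.Set.ofList l).toFinset = l.toFinset := by
    ext y; simp [PySem.Set.mem_ofList]
  rw [← h1, List.toFinset_card_of_nodup (PySem.Set.nodup_ofList l)]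

-- A's counting dictionary has as many entries as there are distinct k-mers.
theorem dict_fold_size (l : List Int) (g : Int → String) :
    ((l.foldl (fun d i =>
        let kmer := g i
        if d.contains kmer = false then d.insert kmer 1
        else d.insert kmer (d.getD kmer 0 + 1))
      (PySem.Dict.empty (κ := String) (ν := Int))).size : Int)
      = ((l.map g).toFinset.card : Int) := by
  have hbody : (fun (d : PySem.Dict String Int) i =>
      let kmer := g i
      if d.contains kmer = false then d.insert kmer 1
      else d.insert kmer (d.getD kmer 0 + 1))
    = (fun (d : PySem.Dict String Int) i =>
        d.insert (g i) (if d.contains (g i) = false then 1 else d.getD (g i) 0 + 1)) := by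
    funext d i
    by_cases h : d.contains (g i) = false <;> simp [h]
  rw [hbody]
  have hkeys := PySem.Dict.keys_foldl_insert_key l g
    (fun d i => if d.contains (g i) = false then 1 else d.getD (g i) 0 + 1)
    (PySem.Dict.empty (κ := String) (ν := Int))
  have hsize : ∀ (d : PySem.Dict String Int), d.size = d.keys.length := by
    intro d; simp [PySem.Dict.size, PySem.Dict.keys]
  rw [hsize, hkeys]
  have hupd : PySem.Set.update (PySem.Dict.empty (κ := String) (ν := Int)).keys (l.map g)
      = PySem.Set.ofList (l.map g) := rfl
  rw [hupd, ofList_length_toFinset]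

theorem ports_agree : ∀ (sequence : String),
    observed_kmers_list sequence = observed_kmers_list_alt sequence := by
  intro s
  unfold observed_kmers_list observed_kmers_list_alt
  simp only [PySem.List.foldl_append_singleton_eq_map, List.nil_append]
  apply List.map_congr_left
  intro k _
  dsimp only
  rw [dict_fold_size (PySem.List.pyRange 0 (PySem.Str.len s - k + 1))
      (fun i => PySem.Str.slice s (some i) (some (i + k)))]
  rw [scan_none _ (PySem.List.sorted_pairwise _ (fun x => x)) 0]
  rw [List.toFinset_eq_of_perm _ _ (PySem.List.sorted_perm _ (fun x => x) false)]
  ring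

-- ===== VERDICT (by name: the statement is the Claim_ definition above) =====
theorem observed_kmers_list_spec : Claim_equal_observed_kmers_list := by
  intro s _
  exact (ports_agree s).symm ▸ rfl
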